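-- pv_equiv track=rewrite | github.com/carlhelp68/Intro | extra_credit/problem42.py | triangle_words
-- ===== SOURCE A (Python) =====
-- def triangle_words(list_t,text):
-- 	'''checks to see if the sum of the characters in a word equals a triangle value'''
-- 	value=0
-- 	t_words = 0
-- 	'''removes parenthesis around word'''
-- 	text = [t[1:len(t)-1] for t in text]
-- 	for word in text:
-- 		for char in word:
-- 			value += (ord(char)-64)
-- 		for i in list_t:
-- 			if i == value:
-- 				t_words+=1
-- 		value = 0
-- 	return t_words
-- ===== SOURCE B (Python) =====
-- def triangle_words(list_t, text):
--     '''checks to see if the sum of the characters in a word equals a triangle value'''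
--     counts = {}
--     for t in text:
--         word = t[1:len(t)-1]
--         s = sum(ord(c) - 64 for c in word)
--         counts[s] = counts.get(s, 0) + 1
--     total = 0
--     for i in list_t:
--         total += counts.get(i, 0)
--     return total
-- ===== Notes on version B (the rewrite author's own statement) =====
-- stated objective: faster
-- what changed: Inverts A's nesting: instead of rescanning list_t for every word (O(len(text)*len(list_t))), B tallies each word's char-sum once in a dict and then accumulates the tallies in a single pass over list_t.
import Mathlib
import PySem

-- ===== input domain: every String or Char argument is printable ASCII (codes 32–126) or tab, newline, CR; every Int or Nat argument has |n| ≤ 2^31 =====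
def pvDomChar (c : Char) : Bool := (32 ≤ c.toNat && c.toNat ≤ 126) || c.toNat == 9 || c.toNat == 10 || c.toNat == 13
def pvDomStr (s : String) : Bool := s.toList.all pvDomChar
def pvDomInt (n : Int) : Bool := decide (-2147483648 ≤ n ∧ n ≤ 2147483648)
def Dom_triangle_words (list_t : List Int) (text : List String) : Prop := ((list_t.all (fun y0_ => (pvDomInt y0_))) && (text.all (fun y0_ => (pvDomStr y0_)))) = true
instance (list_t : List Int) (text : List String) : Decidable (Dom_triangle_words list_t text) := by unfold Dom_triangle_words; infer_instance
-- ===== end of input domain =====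

-- B builds a dict tallying each word's char-sum once, then scans list_t once, instead of
-- rescanning list_t per word (objective: faster, asymptotically fewer inner scans).

-- ===== PORT A =====
def triangle_words (list_t : List Int) (text : List String) : Int :=
  -- text = [t[1:len(t)-1] for t in text]
  let text2 := text.map (fun t => PySem.Str.slice t (some 1) (some (PySem.Str.len t - 1)))
  -- state (value, t_words); the inner char loop adds onto `value`, then the list_t scan
  -- increments t_words, then value is reset to 0
  let st := text2.foldl
    (fun (st : Int × Int) word =>
      let value : Int := word.toList.foldl (fun (v : Int) (c : Char) => v + ((c.toNat : Int) - 64)) st.1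
      let t_words := list_t.foldl (fun (tw : Int) (i : Int) => if i = value then tw + 1 else tw) st.2
      (0, t_words))
    (0, 0)
  st.2

-- ===== PORT B =====
-- char-sum of the stripped token: sum(ord(c) - 64 for c in t[1:len(t)-1])
def twWordSum (t : String) : Int :=
  ((PySem.Str.slice t (some 1) (some (PySem.Str.len t - 1))).toList.map
    (fun c => ((c.toNat : Int) - 64))).sum

def triangle_words_alt (list_t : List Int) (text : List String) : Int :=
  -- counts[s] = counts.get(s, 0) + 1 for each word's char-sum s
  let counts := text.foldl (fun (d : PySem.Dict Int Int) t => d.modify (twWordSum t) 0 (· + 1))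
    PySem.Dict.empty
  -- total += counts.get(i, 0) for each i in list_t
  list_t.foldl (fun tot i => tot + counts.getD i 0) 0

-- ===== PRECONDITION & SPEC =====
def Spec_triangle_words (list_t : List Int) (text : List String) (out : Int) : Prop := out = triangle_words_alt list_t text
instance (list_t : List Int) (text : List String) (out : Int) : Decidable (Spec_triangle_words list_t text out) := by unfold Spec_triangle_words; infer_instance

-- ===== CLAIM (what is proved, stated in full; the proofs are below) =====
def Claim_equal_triangle_words : Prop := ∀ (list_t : List Int) (text : List String), Dom_triangle_words list_t text → Spec_triangle_words list_t text (triangle_words list_t text)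

-- ===== LEMMAS AND PROOFS =====

-- the inner `for i in list_t: if i == value: t_words += 1` loop counts occurrences
theorem tw_count_loop (list_t : List Int) (v tw : Int) :
    list_t.foldl (fun (tw : Int) (i : Int) => if i = v then tw + 1 else tw) tw
      = tw + list_t.count v := by
  induction list_t generalizing tw with
  | nil => simp
  | cons a l ih =>
      simp only [List.foldl_cons, List.count_cons, ih]
      by_cases h : a = v
      · simp [h]; ring
      · simp [h]

-- A's outer loop: t_words accumulates, value is reset to 0 each iteration
theorem tw_outer_loop (list_t : List Int) (ws : List String) (tw : Int) :
    (ws.foldl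
      (fun (st : Int × Int) word =>
        let value : Int := word.toList.foldl (fun (v : Int) (c : Char) => v + ((c.toNat : Int) - 64)) st.1
        let t_words := list_t.foldl (fun (tw : Int) (i : Int) => if i = value then tw + 1 else tw) st.2
        (0, t_words))
      (0, tw)).2
    = tw + (ws.map (fun w =>
        ((list_t.count ((w.toList.map (fun c => ((c.toNat : Int) - 64))).sum) : Nat) : Int))).sum := by
  induction ws generalizing tw with
  | nil => simp
  | cons w ws ih =>
      simp only [List.foldl_cons, List.map_cons, List.sum_cons]
      rw [ih]
      have hs : w.toList.foldl (fun (v : Int) (c : Char) => v + ((c.toNat : Int) - 64)) 0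
          = (w.toList.map (fun c => ((c.toNat : Int) - 64))).sum := by
        simpa using PySem.List.foldl_add w.toList (fun c => ((c.toNat : Int) - 64)) 0
      simp only [hs, tw_count_loop]
      ring

-- summing an equality indicator over L counts v in L
theorem tw_sum_indicator (L : List Int) (v : Int) :
    (L.map (fun i => if i = v then (1 : Int) else 0)).sum = ((L.count v : Nat) : Int) := by
  induction L with
  | nil => simp
  | cons a L ih =>
      simp only [List.map_cons, List.sum_cons, ih, List.count_cons]
      by_cases h : a = v
      · simp [h]; ring
      · simp [h]

-- double counting: summing L.count over S equals summing S.count over L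
theorem tw_double_count (S L : List Int) :
    (S.map (fun v => ((L.count v : Nat) : Int))).sum
      = (L.map (fun i => ((S.count i : Nat) : Int))).sum := by
  induction S with
  | nil => simp
  | cons v S ih =>
      simp only [List.map_cons, List.sum_cons, ih]
      have h1 : (L.map (fun i => (((v :: S).count i : Nat) : Int)))
          = (L.map (fun i => (if i = v then (1:Int) else 0) + ((S.count i : Nat) : Int))) := by
        apply List.map_congr_left
        intro i _
        by_cases h : i = v
        · simp [h]; ring
        · simp [h, Ne.symm h]
      rw [h1, List.sum_map_add, tw_sum_indicator]

-- ===== VERDICT (by name: the statement is the Claim_ definition above) =====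
theorem triangle_words_spec : Claim_equal_triangle_words := by
  intro list_t text _
  unfold Spec_triangle_words triangle_words triangle_words_alt
  have hctr : text.foldl (fun (d : PySem.Dict Int Int) t => d.modify (twWordSum t) 0 (· + 1))
      PySem.Dict.empty = PySem.Dict.counter (text.map twWordSum) := by
    rw [PySem.Dict.counter_eq_foldl, List.foldl_map]
  simp only [hctr]
  rw [PySem.List.foldl_add list_t
    (fun i => (PySem.Dict.counter (text.map twWordSum)).getD i 0) 0]
  simp only [PySem.Dict.getD_counter, tw_outer_loop, zero_add]
  rw [tw_double_count]
  congr 1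
  rw [List.map_map, List.map_map]
  apply List.map_congr_left
  intro t _
  simp only [Function.comp, twWordSum]
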